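-- pv_equiv track=rewrite | github.com/cvick32/AttackerSynthesis | KORG/spin.py | parse_trail
-- ===== SOURCE A (Python) =====
-- def parse_trail(trailBody):
--     """
--     Parses output of reading trail using Spin.
--     This will have to change when abstracted away from rendezvous
--     """
--     ret, i = [[], []], 0
--     for line in trailBody.split("\n"):
--         if "(daisy:" in line:
--             # https://stackoverflow.com/a/29571669/1586231
--             LL = line.rstrip("*")
--             chan = LL[line.rfind("(") + 1 : -1]
--             msg, evt = None, None
--             if "Recv " in line:
--                 msg = LL[line.rfind("Recv ") + 5 :].split()[0]
--                 evt = "?"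
--             elif "Send" in line:
--                 msg = LL[line.rfind("Send ") + 5 :].split()[0]
--                 evt = "!"
--             if evt != None and msg != None:
--                 ret[i].append(chan + " " + evt + " " + msg)
--         elif "CYCLE" in line:
--             i = 1
--     return ret
-- ===== SOURCE B (Python) =====
-- def parse_trail(trailBody):
--     lines = trailBody.split("\n")
--     boundary = next((i for i, line in enumerate(lines)
--                      if "CYCLE" in line and "(daisy:" not in line), len(lines))
--
--     def parse_line(line):
--         if "(daisy:" not in line:
--             return None
--         LL = line.rstrip("*")
--         chan = LL[line.rfind("(") + 1 : -1]
--         if "Recv " in line: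
--             return chan + " ? " + LL[line.rfind("Recv ") + 5 :].split()[0]
--         if "Send" in line:
--             return chan + " ! " + LL[line.rfind("Send ") + 5 :].split()[0]
--         return None
--
--     return [[m for m in map(parse_line, lines[:boundary]) if m is not None],
--             [m for m in map(parse_line, lines[boundary:]) if m is not None]]
-- ===== Notes on version B (the rewrite author's own statement) =====
-- stated objective: alternative
-- what changed: Replaces A's single stateful fold (index toggle i mutated across the loop) with a boundary search (first CYCLE non-daisy line), a slice of the line list, and two uniform map/filter passes with a stateless single-line parser.
import Mathlib
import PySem

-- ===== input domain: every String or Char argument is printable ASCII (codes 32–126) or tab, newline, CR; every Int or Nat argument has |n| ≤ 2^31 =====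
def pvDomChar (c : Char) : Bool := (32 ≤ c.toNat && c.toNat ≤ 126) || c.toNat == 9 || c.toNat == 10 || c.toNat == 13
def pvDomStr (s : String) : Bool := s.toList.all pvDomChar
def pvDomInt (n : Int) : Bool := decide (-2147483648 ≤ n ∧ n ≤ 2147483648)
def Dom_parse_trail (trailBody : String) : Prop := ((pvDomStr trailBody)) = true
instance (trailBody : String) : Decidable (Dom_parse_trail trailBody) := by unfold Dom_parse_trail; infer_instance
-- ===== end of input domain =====

-- B replaces A's stateful index toggle with a boundary search, a slice, and two uniform
-- map/filter passes with a single-line parser (objective: alternative decomposition, same cost).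

-- trailBody.split("\n") — sep is non-empty, so Str.split? is always `some`; exact
def pvLines (s : String) : List String := (PySem.Str.split? s "\n").getD []

-- line.rstrip("*") — PySem has no rstrip-with-chars; exact hand port: drop trailing '*'
def pvRstripStar (s : String) : String :=
  String.ofList ((s.toList.reverse.dropWhile (fun c => c == '*')).reverse)

-- ===== PORT A =====
-- the loop body of A: state is (ret[0], ret[1], i as Bool).  Where Python A raises
-- (empty .split() hit by [0], excluded by Pre_) the port skips the append.
def pvStepA (st : List String × List String × Bool) (line : String) :
    List String × List String × Bool :=
  if PySem.Str.isIn "(daisy:" line then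
    let LL := pvRstripStar line
    let chan := PySem.Str.slice LL (some (PySem.Str.rfind line "(" + 1)) (some (-1))
    let em? : Option (String × String) :=
      if PySem.Str.isIn "Recv " line then
        ((PySem.Str.split₀ (PySem.Str.slice LL (some (PySem.Str.rfind line "Recv " + 5)) none)).head?).map
          (fun m => ("?", m))
      else if PySem.Str.isIn "Send" line then
        ((PySem.Str.split₀ (PySem.Str.slice LL (some (PySem.Str.rfind line "Send " + 5)) none)).head?).map
          (fun m => ("!", m))
      else none
    match em? with
    | some (evt, msg) =>
        if st.2.2 then (st.1, st.2.1 ++ [chan ++ " " ++ evt ++ " " ++ msg], st.2.2)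
        else (st.1 ++ [chan ++ " " ++ evt ++ " " ++ msg], st.2.1, st.2.2)
    | none => st
  else if PySem.Str.isIn "CYCLE" line then (st.1, st.2.1, true)
  else st

def parse_trail (trailBody : String) : List (List String) :=
  let fin := (pvLines trailBody).foldl pvStepA ([], [], false)
  [fin.1, fin.2.1]

-- ===== PORT B =====
-- Source B's parse_line; None → none (an empty .split() hit by [0] raises in Python, excluded by Pre_)
def pvParseLine (line : String) : Option String :=
  if PySem.Str.isIn "(daisy:" line then
    let LL := pvRstripStar line
    let chan := PySem.Str.slice LL (some (PySem.Str.rfind line "(" + 1)) (some (-1))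
    if PySem.Str.isIn "Recv " line then
      ((PySem.Str.split₀ (PySem.Str.slice LL (some (PySem.Str.rfind line "Recv " + 5)) none)).head?).map
        (fun m => chan ++ " ? " ++ m)
    else if PySem.Str.isIn "Send" line then
      ((PySem.Str.split₀ (PySem.Str.slice LL (some (PySem.Str.rfind line "Send " + 5)) none)).head?).map
        (fun m => chan ++ " ! " ++ m)
    else none
  else none

-- Source B's boundary predicate
def pvIsBoundary (line : String) : Bool :=
  PySem.Str.isIn "CYCLE" line && !(PySem.Str.isIn "(daisy:" line)

def parse_trail_alt (trailBody : String) : List (List String) :=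
  let lines := pvLines trailBody
  -- next(enumerate …, len(lines)) = index of first boundary line, or length
  let boundary := lines.findIdx pvIsBoundary
  -- lines[:boundary] / lines[boundary:] with 0 ≤ boundary ≤ len(lines) are take/drop;
  -- [m for m in map(parse_line, …) if m is not None] is filterMap
  [(lines.take boundary).filterMap pvParseLine,
   (lines.drop boundary).filterMap pvParseLine]

-- ===== PRECONDITION & SPEC =====
-- Pre_ excludes exactly the inputs on which Python A raises IndexError: a "(daisy:" line whose
-- Recv/Send payload (after rstrip("*")) splits to no token, so .split()[0] fails; B raises there too.
def pvLineOk (line : String) : Bool :=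
  if PySem.Str.isIn "(daisy:" line then
    if PySem.Str.isIn "Recv " line then
      !(PySem.Str.split₀ (PySem.Str.slice (pvRstripStar line) (some (PySem.Str.rfind line "Recv " + 5)) none)).isEmpty
    else if PySem.Str.isIn "Send" line then
      !(PySem.Str.split₀ (PySem.Str.slice (pvRstripStar line) (some (PySem.Str.rfind line "Send " + 5)) none)).isEmpty
    else true
  else true

def Pre_parse_trail (trailBody : String) : Prop :=
  ((pvLines trailBody).all pvLineOk) = true
instance (trailBody : String) : Decidable (Pre_parse_trail trailBody) := by
  unfold Pre_parse_trail; infer_instance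

def pvWitness_parse_trail : String :=
  "(daisy:c) Recv hello\n<<<<<START OF CYCLE>>>>>\n(daisy:c) Send bye***"

def Spec_parse_trail (trailBody : String) (out : List (List String)) : Prop := out = parse_trail_alt trailBody
instance (trailBody : String) (out : List (List String)) : Decidable (Spec_parse_trail trailBody out) := by unfold Spec_parse_trail; infer_instance

-- ===== CLAIM (what is proved, stated in full; the proofs are below) =====
def Claim_equal_parse_trail : Prop := ∀ (trailBody : String), Dom_parse_trail trailBody → Pre_parse_trail trailBody → Spec_parse_trail trailBody (parse_trail trailBody)

-- ===== LEMMAS AND PROOFS =====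

-- the concatenations "chan + ' ' + '?' + ' ' + m" (A) and "chan + ' ? ' + m" (B) agree
theorem pvStr_concat_q (chan m : String) :
    chan ++ " " ++ "?" ++ " " ++ m = chan ++ " ? " ++ m := by
  simp [String.append_assoc]

theorem pvStr_concat_b (chan m : String) :
    chan ++ " " ++ "!" ++ " " ++ m = chan ++ " ! " ++ m := by
  simp [String.append_assoc]

-- a non-boundary line: A's step appends exactly (pvParseLine line).toList to ret[0]
theorem pvStepA_false (r0 r1 : List String) (line : String)
    (h : pvIsBoundary line = false) :
    pvStepA (r0, r1, false) line = (r0 ++ (pvParseLine line).toList, r1, false) := by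
  by_cases hd : PySem.Str.isIn "(daisy:" line
  · by_cases hr : PySem.Str.isIn "Recv " line
    · rcases hsp : PySem.Str.split₀ (PySem.Str.slice (pvRstripStar line) (some (PySem.Str.rfind line "Recv " + 5)) none) with _ | ⟨m, rest⟩ <;>
      · simp at hd hr hsp
        simp [pvStepA, pvParseLine, hd, hr, hsp, pvStr_concat_q]
    · by_cases hs : PySem.Str.isIn "Send" line
      · rcases hsp : PySem.Str.split₀ (PySem.Str.slice (pvRstripStar line) (some (PySem.Str.rfind line "Send " + 5)) none) with _ | ⟨m, rest⟩ <;>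
        · simp at hd hr hs hsp
          simp [pvStepA, pvParseLine, hd, hr, hs, hsp, pvStr_concat_b]
      · simp at hd hr hs
        simp [pvStepA, pvParseLine, hd, hr, hs]
  · simp at hd
    simp [pvIsBoundary, hd] at h
    simp [pvStepA, pvParseLine, hd, h]

-- a boundary line flips i and parses to none
theorem pvStepA_boundary (r0 r1 : List String) (line : String)
    (h : pvIsBoundary line = true) :
    pvStepA (r0, r1, false) line = (r0, r1, true) ∧ pvParseLine line = none := by
  simp [pvIsBoundary] at h
  obtain ⟨hc, hd⟩ := h
  constructor
  · simp [pvStepA, hd, hc]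
  · simp [pvParseLine, hd]

-- after the flip every line's message goes to ret[1]
theorem pvStepA_true (r0 r1 : List String) (line : String) :
    pvStepA (r0, r1, true) line = (r0, r1 ++ (pvParseLine line).toList, true) := by
  by_cases hd : PySem.Str.isIn "(daisy:" line
  · by_cases hr : PySem.Str.isIn "Recv " line
    · rcases hsp : PySem.Str.split₀ (PySem.Str.slice (pvRstripStar line) (some (PySem.Str.rfind line "Recv " + 5)) none) with _ | ⟨m, rest⟩ <;>
      · simp at hd hr hsp
        simp [pvStepA, pvParseLine, hd, hr, hsp, pvStr_concat_q]
    · by_cases hs : PySem.Str.isIn "Send" line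
      · rcases hsp : PySem.Str.split₀ (PySem.Str.slice (pvRstripStar line) (some (PySem.Str.rfind line "Send " + 5)) none) with _ | ⟨m, rest⟩ <;>
        · simp at hd hr hs hsp
          simp [pvStepA, pvParseLine, hd, hr, hs, hsp, pvStr_concat_b]
      · simp at hd hr hs
        simp [pvStepA, pvParseLine, hd, hr, hs]
  · by_cases hc : PySem.Str.isIn "CYCLE" line
    · simp at hd hc
      simp [pvStepA, pvParseLine, hd, hc]
    · simp at hd hc
      simp [pvStepA, pvParseLine, hd, hc]

theorem pvFold_true (lines : List String) (r0 r1 : List String) :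
    lines.foldl pvStepA (r0, r1, true) = (r0, r1 ++ lines.filterMap pvParseLine, true) := by
  induction lines generalizing r1 with
  | nil => simp
  | cons l ls ih =>
    rw [List.foldl_cons, pvStepA_true, ih]
    cases hP : pvParseLine l <;> simp [hP]

theorem pvFold_false (lines : List String) (r0 r1 : List String) :
    lines.foldl pvStepA (r0, r1, false) =
      (r0 ++ (lines.take (lines.findIdx pvIsBoundary)).filterMap pvParseLine,
       r1 ++ (lines.drop (lines.findIdx pvIsBoundary)).filterMap pvParseLine,
       lines.any pvIsBoundary) := by
  induction lines generalizing r0 with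
  | nil => simp
  | cons l ls ih =>
    cases hb : pvIsBoundary l with
    | false =>
      rw [List.foldl_cons, pvStepA_false _ _ _ hb, ih]
      cases hP : pvParseLine l <;> simp [List.findIdx_cons, hb, hP]
    | true =>
      obtain ⟨h1, h2⟩ := pvStepA_boundary r0 r1 l hb
      rw [List.foldl_cons, h1, pvFold_true]
      simp [List.findIdx_cons, hb, h2]

-- ===== VERDICT (by name: the statement is the Claim_ definition above) =====
theorem parse_trail_spec : Claim_equal_parse_trail := by
  intro tb _ _
  unfold Spec_parse_trail parse_trail parse_trail_alt
  rw [pvFold_false]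
  simp
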